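-- pv_equiv track=rewrite | github.com/dengguojie/vue-element-admin | auto_schedule/python/tbe/dsl/base/classifier/norm_classifier.py | _cal_norm_pattern
-- ===== SOURCE A (Python) =====
-- from enum import Enum
--
-- REDUCE_PATTERN_KEY_WEIGHT = 1000
--
-- class ModeType(Enum):
--     """
--     mode type enum
--     input after broadcast include:
--     1. common
--     2. no_fuse
--     input before broadcast include:
--     1. broadcast_axis_known
--     2. no_broadcast, broadcast_reduce_equal, broadcast_reduce_opposite, all_broadcast,
--        broadcast_unknown, single_broadcast_known_and_no_fuse
--     """
--     COMMON = "common"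
--     NO_FUSE = "no_fuse"
--     BROADCAST_AXIS_KNOWN = "broadcast_axis_known"
--     NO_BROADCAST = "no_broadcast"
--     BROADCAST_REDUCE_EQUAL = "broadcast_reduce_equal"
--     BROADCAST_REDUCE_OPPOSITE = "broadcast_reduce_opposite"
--     ALL_BROADCAST = "all_broadcast"
--     BROADCAST_UNKNOWN = "broadcast_unknown"
--     SINGLE_BROADCAST_KNOWN_AND_NO_FUSE = "single_broadcast_known_and_no_fuse"
--
-- def _cal_norm_pattern(mode_str_list, broadcast_axis, reduce_axis, shape_len):
--     """
--     calculate norm pattern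
--     """
--     def __get_single_pattern_key(_axis_list):
--         _pattern = 0
--         for _i in range(shape_len):
--             if _i in _axis_list:
--                 _pattern += 2 ** (shape_len - _i - 1) * 2
--             else:
--                 _pattern += 2 ** (shape_len - _i - 1)
--
--         return _pattern
--
--     input_mode_and_key_map = {
--         ModeType.NO_BROADCAST: 0,
--         ModeType.BROADCAST_REDUCE_EQUAL: 1,
--         ModeType.BROADCAST_REDUCE_OPPOSITE: 2,
--         ModeType.ALL_BROADCAST: 3,
--         ModeType.BROADCAST_UNKNOWN: 4,
--         ModeType.SINGLE_BROADCAST_KNOWN_AND_NO_FUSE: 4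
--     }
--
--     mode_enum_list = []
--     for mode_str in mode_str_list:
--         mode_enum_list.append(ModeType(mode_str))
--     # all inputs broadcast axis are known and the same
--     if broadcast_axis is not None:
--         broadcast_pattern_key = __get_single_pattern_key(broadcast_axis)
--     else:
--         broadcast_pattern_key = 0
--         for single_mode_enum in mode_enum_list:
--             # input after broadcast is not involved in pattern key calculation
--             if single_mode_enum in (ModeType.COMMON, ModeType.NO_FUSE):
--                 continue
--             broadcast_pattern_key = 10 * broadcast_pattern_key + input_mode_and_key_map.get(single_mode_enum)
--
--     reduce_pattern_key = __get_single_pattern_key(reduce_axis)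
--
--     return reduce_pattern_key * REDUCE_PATTERN_KEY_WEIGHT + broadcast_pattern_key
-- ===== SOURCE B (Python) =====
-- REDUCE_PATTERN_KEY_WEIGHT = 1000
--
-- _MODE_KEY_MAP = {
--     "no_broadcast": 0,
--     "broadcast_reduce_equal": 1,
--     "broadcast_reduce_opposite": 2,
--     "all_broadcast": 3,
--     "broadcast_unknown": 4,
--     "single_broadcast_known_and_no_fuse": 4,
-- }
--
--
-- def _cal_norm_pattern(mode_str_list, broadcast_axis, reduce_axis, shape_len):
--     """
--     calculate norm pattern (closed-form pattern key: base 2**shape_len - 1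
--     plus one extra 2**(shape_len-i-1) per distinct in-range axis)
--     """
--     def pattern_key(axis_list):
--         key = (1 << shape_len) - 1 if shape_len > 0 else 0
--         for i in set(axis_list):
--             if 0 <= i < shape_len:
--                 key += 1 << (shape_len - i - 1)
--         return key
--
--     if broadcast_axis is not None:
--         broadcast_pattern_key = pattern_key(broadcast_axis)
--     else:
--         broadcast_pattern_key = 0
--         for mode_str in mode_str_list:
--             if mode_str in ("common", "no_fuse"):
--                 continue
--             broadcast_pattern_key = 10 * broadcast_pattern_key + _MODE_KEY_MAP[mode_str]
--
--     return pattern_key(reduce_axis) * REDUCE_PATTERN_KEY_WEIGHT + broadcast_pattern_key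
-- ===== Notes on version B (the rewrite author's own statement) =====
-- stated objective: faster
-- what changed: The per-position scan __get_single_pattern_key (loop over range(shape_len) with an 'in axis_list' membership test at each position) is replaced by a closed form: base (1<<shape_len)-1 plus one extra bit 1<<(shape_len-i-1) per distinct in-range axis, iterating only over set(axis_list); the mode loop works on strings directly via a dict instead of converting to enums first.
-- outside the precondition, e.g. on _cal_norm_pattern(['bogus'], [0], [0], 2): A raises ValueError, B returns 5005; on _cal_norm_pattern(['broadcast_axis_known'], None, [0], 2): A raises TypeError, B raises KeyError
import Mathlib
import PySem

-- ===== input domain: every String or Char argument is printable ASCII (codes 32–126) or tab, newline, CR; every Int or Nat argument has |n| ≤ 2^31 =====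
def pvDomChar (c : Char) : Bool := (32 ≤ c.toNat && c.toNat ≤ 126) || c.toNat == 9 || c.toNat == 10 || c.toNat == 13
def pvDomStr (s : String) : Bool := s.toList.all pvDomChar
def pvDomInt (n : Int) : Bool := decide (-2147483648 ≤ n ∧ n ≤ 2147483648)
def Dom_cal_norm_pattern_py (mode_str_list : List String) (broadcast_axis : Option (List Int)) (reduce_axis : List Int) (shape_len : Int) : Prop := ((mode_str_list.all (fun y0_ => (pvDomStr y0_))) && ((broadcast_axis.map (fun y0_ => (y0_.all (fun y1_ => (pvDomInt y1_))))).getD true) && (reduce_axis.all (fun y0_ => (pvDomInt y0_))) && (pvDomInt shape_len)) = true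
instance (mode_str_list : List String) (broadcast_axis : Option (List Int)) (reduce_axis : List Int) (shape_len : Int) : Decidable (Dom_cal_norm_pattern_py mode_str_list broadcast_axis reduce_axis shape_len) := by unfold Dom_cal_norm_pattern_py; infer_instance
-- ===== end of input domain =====

-- B replaces A's per-position scan of range(shape_len) by a closed form (base 2^shape_len - 1
-- plus one extra bit per distinct in-range axis) and folds the mode strings directly; objective: faster.

-- ===== PORT A =====
inductive PyModeType where
  | common | no_fuse | broadcast_axis_known | no_broadcast | broadcast_reduce_equal
  | broadcast_reduce_opposite | all_broadcast | broadcast_unknown | single_broadcast_known_and_no_fuse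
deriving DecidableEq, Repr

-- ModeType(mode_str); none = ValueError (excluded by Pre_)
def modeOfStr? (s : String) : Option PyModeType :=
  if s = "common" then some .common
  else if s = "no_fuse" then some .no_fuse
  else if s = "broadcast_axis_known" then some .broadcast_axis_known
  else if s = "no_broadcast" then some .no_broadcast
  else if s = "broadcast_reduce_equal" then some .broadcast_reduce_equal
  else if s = "broadcast_reduce_opposite" then some .broadcast_reduce_opposite
  else if s = "all_broadcast" then some .all_broadcast
  else if s = "broadcast_unknown" then some .broadcast_unknown
  else if s = "single_broadcast_known_and_no_fuse" then some .single_broadcast_known_and_no_fuse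
  else none

-- input_mode_and_key_map.get(m) (None for keys not in the dict)
def modeKeyMapGet (m : PyModeType) : Option Int :=
  match m with
  | .no_broadcast => some 0
  | .broadcast_reduce_equal => some 1
  | .broadcast_reduce_opposite => some 2
  | .all_broadcast => some 3
  | .broadcast_unknown => some 4
  | .single_broadcast_known_and_no_fuse => some 4
  | _ => none

-- the loop 'mode_enum_list.append(ModeType(mode_str))'; none = some conversion raised
def toEnumList? : List String → Option (List PyModeType)
  | [] => some []
  | s :: rest => (modeOfStr? s).bind (fun m => (toEnumList? rest).map (fun es => m :: es))

-- __get_single_pattern_key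
def getSinglePatternKey (axisList : List Int) (shapeLen : Int) : Int :=
  (PySem.List.pyRange 0 shapeLen 1).foldl
    (fun p i => if i ∈ axisList then p + 2 ^ ((shapeLen - i - 1).toNat) * 2
                else p + 2 ^ ((shapeLen - i - 1).toNat)) 0

def cal_norm_pattern_py (mode_str_list : List String) (broadcast_axis : Option (List Int)) (reduce_axis : List Int) (shape_len : Int) : Int :=
  match toEnumList? mode_str_list with
  | none => 0          -- ValueError; excluded by Pre_
  | some mode_enum_list =>
    let bk? : Option Int :=
      match broadcast_axis with
      | some ax => some (getSinglePatternKey ax shape_len)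
      | none =>
        mode_enum_list.foldl
          (fun acc m =>
            if m = PyModeType.common ∨ m = PyModeType.no_fuse then acc
            else acc.bind (fun k => (modeKeyMapGet m).map (fun v => 10 * k + v)))
          (some 0)
    match bk? with
    | none => 0        -- TypeError from '10 * key + None'; excluded by Pre_
    | some bk => getSinglePatternKey reduce_axis shape_len * 1000 + bk

-- ===== PORT B =====
-- _MODE_KEY_MAP[s] (none = KeyError)
def modeKeyOfStr (s : String) : Option Int :=
  if s = "no_broadcast" then some 0
  else if s = "broadcast_reduce_equal" then some 1
  else if s = "broadcast_reduce_opposite" then some 2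
  else if s = "all_broadcast" then some 3
  else if s = "broadcast_unknown" then some 4
  else if s = "single_broadcast_known_and_no_fuse" then some 4
  else none

-- pattern_key: closed-form base plus one extra bit per distinct in-range axis
def altPatternKey (axisList : List Int) (shapeLen : Int) : Int :=
  let base : Int := if 0 < shapeLen then 2 ^ shapeLen.toNat - 1 else 0
  (PySem.Set.ofList axisList).foldl
    (fun k i => if 0 ≤ i ∧ i < shapeLen then k + 2 ^ ((shapeLen - i - 1).toNat) else k) base

def cal_norm_pattern_py_alt (mode_str_list : List String) (broadcast_axis : Option (List Int)) (reduce_axis : List Int) (shape_len : Int) : Int :=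
  let bk? : Option Int :=
    match broadcast_axis with
    | some ax => some (altPatternKey ax shape_len)
    | none =>
      mode_str_list.foldl
        (fun acc s =>
          if s = "common" ∨ s = "no_fuse" then acc
          else acc.bind (fun k => (modeKeyOfStr s).map (fun v => 10 * k + v)))
        (some 0)
  match bk? with
  | none => 0          -- KeyError; excluded by Pre_
  | some bk => altPatternKey reduce_axis shape_len * 1000 + bk

-- ===== PRECONDITION & SPEC =====
def pvValidModes : List String :=
  ["common", "no_fuse", "broadcast_axis_known", "no_broadcast", "broadcast_reduce_equal",
   "broadcast_reduce_opposite", "all_broadcast", "broadcast_unknown",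
   "single_broadcast_known_and_no_fuse"]

-- A raises ValueError on any mode string that is not a ModeType value, and TypeError
-- ('10 * key + None') when broadcast_axis is None and "broadcast_axis_known" occurs; Pre_ excludes exactly those.
def Pre_cal_norm_pattern_py (mode_str_list : List String) (broadcast_axis : Option (List Int)) (reduce_axis : List Int) (shape_len : Int) : Prop :=
  (∀ s ∈ mode_str_list, s ∈ pvValidModes) ∧
  (broadcast_axis = none → "broadcast_axis_known" ∉ mode_str_list)
instance (mode_str_list : List String) (broadcast_axis : Option (List Int)) (reduce_axis : List Int) (shape_len : Int) : Decidable (Pre_cal_norm_pattern_py mode_str_list broadcast_axis reduce_axis shape_len) := by unfold Pre_cal_norm_pattern_py; infer_instance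

def pvWitness_cal_norm_pattern_py : List String × Option (List Int) × List Int × Int :=
  (["no_broadcast", "common"], some [0], [1, 1, 5], 3)

def Spec_cal_norm_pattern_py (mode_str_list : List String) (broadcast_axis : Option (List Int)) (reduce_axis : List Int) (shape_len : Int) (out : Int) : Prop := out = cal_norm_pattern_py_alt mode_str_list broadcast_axis reduce_axis shape_len
instance (mode_str_list : List String) (broadcast_axis : Option (List Int)) (reduce_axis : List Int) (shape_len : Int) (out : Int) : Decidable (Spec_cal_norm_pattern_py mode_str_list broadcast_axis reduce_axis shape_len out) := by unfold Spec_cal_norm_pattern_py; infer_instance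

-- ===== CLAIM (what is proved, stated in full; the proofs are below) =====
def Claim_equal_cal_norm_pattern_py : Prop := ∀ (mode_str_list : List String) (broadcast_axis : Option (List Int)) (reduce_axis : List Int) (shape_len : Int), Dom_cal_norm_pattern_py mode_str_list broadcast_axis reduce_axis shape_len → Pre_cal_norm_pattern_py mode_str_list broadcast_axis reduce_axis shape_len → Spec_cal_norm_pattern_py mode_str_list broadcast_axis reduce_axis shape_len (cal_norm_pattern_py mode_str_list broadcast_axis reduce_axis shape_len)

-- ===== LEMMAS AND PROOFS =====

-- a sum of 'if P then f else 0' is the sum of f over the filtered list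
theorem pv_sum_map_ite_filter {α : Type} (P : α → Prop) [DecidablePred P] (f : α → Int) (l : List α) :
    (l.map (fun x => if P x then f x else 0)).sum
      = ((l.filter (fun x => decide (P x))).map f).sum := by
  induction l with
  | nil => simp
  | cons a l ih =>
    simp only [List.map_cons, List.sum_cons, List.filter_cons, ih]
    by_cases h : P a <;> simp [h]

-- geometric sum: Σ_{k<N} 2^(N-1-k) = 2^N - 1
theorem pv_geom_sum (N : Nat) :
    ((List.range N).map (fun k => (2 : Int) ^ (N - 1 - k))).sum = 2 ^ N - 1 := by
  induction N with
  | zero => simp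
  | succ N ih =>
    rw [List.range_succ]
    have hmap : (List.range N).map (fun k => (2 : Int) ^ (N + 1 - 1 - k))
        = (List.range N).map (fun k => 2 * (2 : Int) ^ (N - 1 - k)) := by
      apply List.map_congr_left
      intro k hk
      have hk' : k < N := List.mem_range.mp hk
      have : N + 1 - 1 - k = (N - 1 - k) + 1 := by omega
      rw [this, pow_succ]; ring
    simp only [List.map_append, List.sum_append, List.map_cons, List.map_nil, List.sum_cons,
      List.sum_nil, hmap, List.sum_map_mul_left, ih]
    have : N + 1 - 1 - N = 0 := by omega
    rw [this]
    ring

-- both pattern-key computations equal base + Σ over the in-range axes (as a filtered sum)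
theorem pv_getSingle_eq_sum (ax : List Int) (n : Int) :
    getSinglePatternKey ax n
      = ((PySem.List.pyRange 0 n 1).map (fun i => (2 : Int) ^ ((n - i - 1).toNat))).sum
        + (((PySem.List.pyRange 0 n 1).filter (fun i => decide (i ∈ ax))).map
            (fun i => (2 : Int) ^ ((n - i - 1).toNat))).sum := by
  unfold getSinglePatternKey
  have hstep : (fun (p : Int) (i : Int) =>
        if i ∈ ax then p + 2 ^ ((n - i - 1).toNat) * 2 else p + 2 ^ ((n - i - 1).toNat))
      = (fun (p : Int) (i : Int) =>
        p + ((2 : Int) ^ ((n - i - 1).toNat)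
             + if i ∈ ax then (2 : Int) ^ ((n - i - 1).toNat) else 0)) := by
    funext p i
    by_cases h : i ∈ ax <;> simp [h] <;> ring
  rw [hstep, PySem.List.foldl_add]
  have hsplit : ((PySem.List.pyRange 0 n 1).map (fun i =>
        (2 : Int) ^ ((n - i - 1).toNat)
          + if i ∈ ax then (2 : Int) ^ ((n - i - 1).toNat) else 0)).sum
      = ((PySem.List.pyRange 0 n 1).map (fun i => (2 : Int) ^ ((n - i - 1).toNat))).sum
        + ((PySem.List.pyRange 0 n 1).map (fun i =>
            if i ∈ ax then (2 : Int) ^ ((n - i - 1).toNat) else 0)).sum := by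
    induction (PySem.List.pyRange 0 n 1) with
    | nil => simp
    | cons a l ih => simp only [List.map_cons, List.sum_cons, ih]; ring
  rw [hsplit, pv_sum_map_ite_filter (fun i => i ∈ ax)]
  ring

theorem pv_alt_eq_sum (ax : List Int) (n : Int) :
    altPatternKey ax n
      = (if 0 < n then (2 : Int) ^ n.toNat - 1 else 0)
        + (((PySem.Set.ofList ax).filter (fun i => decide (0 ≤ i ∧ i < n))).map
            (fun i => (2 : Int) ^ ((n - i - 1).toNat))).sum := by
  unfold altPatternKey
  have hstep : (fun (k : Int) (i : Int) =>
        if 0 ≤ i ∧ i < n then k + 2 ^ ((n - i - 1).toNat) else k)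
      = (fun (k : Int) (i : Int) =>
        k + if 0 ≤ i ∧ i < n then (2 : Int) ^ ((n - i - 1).toNat) else 0) := by
    funext k i
    by_cases h : 0 ≤ i ∧ i < n <;> simp [h]
  simp only [hstep, PySem.List.foldl_add, pv_sum_map_ite_filter (fun i => 0 ≤ i ∧ i < n)]

-- the base sum is the closed form
theorem pv_base_sum (n : Int) :
    ((PySem.List.pyRange 0 n 1).map (fun i => (2 : Int) ^ ((n - i - 1).toNat))).sum
      = (if 0 < n then (2 : Int) ^ n.toNat - 1 else 0) := by
  by_cases h : 0 < n
  · simp only [h, if_pos]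
    rw [PySem.List.pyRange_one]
    have h0 : (n - 0).toNat = n.toNat := by omega
    rw [h0, List.map_map]
    have hmap : List.map ((fun i : Int => (2 : Int) ^ ((n - i - 1).toNat)) ∘ fun k : Nat => (0 : Int) + (k : Int)) (List.range n.toNat)
        = List.map (fun k : Nat => (2 : Int) ^ (n.toNat - 1 - k)) (List.range n.toNat) := by
      apply List.map_congr_left
      intro k hk
      have hk' : k < n.toNat := List.mem_range.mp hk
      simp only [Function.comp_apply]
      congr 1
      omega
    rw [hmap, pv_geom_sum]
  · have : PySem.List.pyRange 0 n 1 = [] := PySem.List.pyRange_one_eq_nil (by omega)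
    simp [this, h]

-- the two filtered axis lists are permutations (same elements, both without duplicates)
theorem pv_filters_perm (ax : List Int) (n : Int) :
    ((PySem.List.pyRange 0 n 1).filter (fun i => decide (i ∈ ax))).Perm
      ((PySem.Set.ofList ax).filter (fun i => decide (0 ≤ i ∧ i < n))) := by
  rw [List.perm_ext_iff_of_nodup
    (List.Nodup.filter _ (PySem.List.nodup_pyRange_one 0 n))
    (List.Nodup.filter _ (PySem.Set.nodup_ofList ax))]
  intro x
  simp only [List.mem_filter, PySem.List.mem_pyRange_one, PySem.Set.mem_ofList, decide_eq_true_eq]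
  tauto

-- the key lemma: the closed form equals the per-position scan
theorem pv_pattern_key_eq (ax : List Int) (n : Int) :
    getSinglePatternKey ax n = altPatternKey ax n := by
  rw [pv_getSingle_eq_sum, pv_alt_eq_sum, pv_base_sum,
    List.Perm.sum_eq (List.Perm.map _ (pv_filters_perm ax n))]

-- valid strings convert successfully, and the enum fold equals the string fold
theorem pv_toEnumList_some (l : List String) (h : ∀ s ∈ l, s ∈ pvValidModes) :
    ∃ es, toEnumList? l = some es := by
  induction l with
  | nil => exact ⟨[], rfl⟩
  | cons s rest ih =>
    obtain ⟨es, hes⟩ := ih (fun t ht => h t (List.mem_cons_of_mem _ ht))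
    have hs := h s List.mem_cons_self
    simp only [pvValidModes, List.mem_cons, List.not_mem_nil, or_false] at hs
    rcases hs with h' | h' | h' | h' | h' | h' | h' | h' | h' <;> subst h' <;>
      simp [toEnumList?, modeOfStr?, hes]

theorem pv_mode_fold_eq (l : List String) (es : List PyModeType)
    (hl : toEnumList? l = some es) : ∀ acc : Option Int,
    es.foldl
      (fun acc m =>
        if m = PyModeType.common ∨ m = PyModeType.no_fuse then acc
        else acc.bind (fun k => (modeKeyMapGet m).map (fun v => 10 * k + v))) acc
    = l.foldl
      (fun acc s =>
        if s = "common" ∨ s = "no_fuse" then acc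
        else acc.bind (fun k => (modeKeyOfStr s).map (fun v => 10 * k + v))) acc := by
  induction l generalizing es with
  | nil => simp only [toEnumList?, Option.some.injEq] at hl; subst hl; intro acc; rfl
  | cons s rest ih =>
    simp only [toEnumList?, Option.bind_eq_some_iff, Option.map_eq_some_iff] at hl
    obtain ⟨m, hm, es', hes', rfl⟩ := hl
    intro acc
    simp only [List.foldl_cons]
    rw [ih es' hes']
    congr 1
    unfold modeOfStr? at hm
    split_ifs at hm with h1 h2 h3 h4 h5 h6 h7 h8 h9 <;>
      (cases hm; subst_vars; simp [modeKeyMapGet, modeKeyOfStr])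

-- ===== VERDICT (by name: the statement is the Claim_ definition above) =====
theorem cal_norm_pattern_py_spec : Claim_equal_cal_norm_pattern_py := by
  intro mode_str_list broadcast_axis reduce_axis shape_len _hdom hpre
  obtain ⟨hvalid, _⟩ := hpre
  obtain ⟨es, hes⟩ := pv_toEnumList_some mode_str_list hvalid
  unfold Spec_cal_norm_pattern_py cal_norm_pattern_py cal_norm_pattern_py_alt
  rw [hes]
  cases broadcast_axis with
  | some ax => simp only [pv_pattern_key_eq]
  | none =>
    simp only [pv_mode_fold_eq mode_str_list es hes (some 0), pv_pattern_key_eq]
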